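-- pv_equiv track=rewrite | github.com/Molochko1990/algorithms_and_complexity_analysis | lab_4/ex_3.py | max_intersection_size
-- ===== SOURCE A (Python) =====
-- def max_intersection_size(sets):
--     max_size = 0
--     n = len(sets) # сколько всего множеств
--
--     # идем по каждому множеству и сравниваем его с каждым множеством.
--     for i in range(n):
--         for j in range(i + 1, n):
--             intersection_size = manual_intersection_size(sets[i], sets[j])
--             if intersection_size > max_size:
--                 max_size = intersection_size
--
--     return max_size
--
-- def manual_intersection_size(set1, set2):
--     intersection_count = 0
--     for elem in set1:
--         if elem in set2:
--             intersection_count += 1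
--     return intersection_count
-- ===== SOURCE B (Python) =====
-- def max_intersection_size(sets):
--     # Precompute, once per list, its multiplicity dict and its distinct-element set,
--     # then size each pairwise intersection via hash-set '&' plus multiplicity lookups.
--     prep = []
--     for s in sets:
--         cnt = {}
--         for e in s:
--             cnt[e] = cnt.get(e, 0) + 1
--         prep.append((cnt, set(s)))
--     best = 0
--     n = len(prep)
--     for i in range(n):
--         cnt_i, sup_i = prep[i]
--         for j in range(i + 1, n):
--             c = 0
--             for e in sup_i & prep[j][1]:
--                 c += cnt_i[e]
--             if c > best:
--                 best = c
--     return best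
-- ===== Notes on version B (the rewrite author's own statement) =====
-- stated objective: alternative
-- what changed: B precomputes each list's multiplicity dict and distinct-element set once, then sizes each pairwise intersection by intersecting the two hash sets and summing stored multiplicities, instead of A's nested membership scan over raw lists for every pair.
import Mathlib
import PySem

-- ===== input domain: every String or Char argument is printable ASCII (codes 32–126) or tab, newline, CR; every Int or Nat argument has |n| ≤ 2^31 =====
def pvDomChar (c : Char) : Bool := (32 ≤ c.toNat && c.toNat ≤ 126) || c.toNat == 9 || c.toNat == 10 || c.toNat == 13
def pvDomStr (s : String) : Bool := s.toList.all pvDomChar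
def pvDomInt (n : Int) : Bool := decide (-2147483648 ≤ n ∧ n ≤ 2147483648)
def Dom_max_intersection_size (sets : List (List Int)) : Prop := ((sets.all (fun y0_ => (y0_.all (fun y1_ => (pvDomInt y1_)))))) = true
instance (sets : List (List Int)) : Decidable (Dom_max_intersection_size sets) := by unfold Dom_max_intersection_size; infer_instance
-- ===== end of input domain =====

-- B sizes each pairwise intersection via per-list multiplicity dicts and hash-set
-- intersection built once, instead of A's per-pair nested membership scans; proved equal on all inputs.


-- ===== PORT A =====
def manual_intersection_size (set1 set2 : List Int) : Int :=
  set1.foldl (fun acc elem => if set2.contains elem then acc + 1 else acc) 0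

def max_intersection_size (sets : List (List Int)) : Int :=
  let n := PySem.List.len sets
  (PySem.List.pyRange 0 n 1).foldl (fun maxSize i =>
    (PySem.List.pyRange (i + 1) n 1).foldl (fun maxSize j =>
      let intersectionSize :=
        manual_intersection_size (PySem.List.pyGetD sets i []) (PySem.List.pyGetD sets j [])
      if intersectionSize > maxSize then intersectionSize else maxSize) maxSize) 0

-- ===== PORT B =====
-- per-list precomputation: multiplicity dict (cnt[e] = cnt.get(e, 0) + 1 loop) and set(s)
def pvPrep (s : List Int) : PySem.Dict Int Int × PySem.Set Int :=
  (s.foldl (fun d e => d.insert e (d.getD e 0 + 1)) PySem.Dict.empty, PySem.Set.ofList s)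

def max_intersection_size_alt (sets : List (List Int)) : Int :=
  let prep := sets.foldl (fun acc s => acc ++ [pvPrep s]) []
  let n := PySem.List.len prep
  (PySem.List.pyRange 0 n 1).foldl (fun best i =>
    let pri := PySem.List.pyGetD prep i (PySem.Dict.empty, [])
    (PySem.List.pyRange (i + 1) n 1).foldl (fun best j =>
      -- 'for e in sup_i & prep[j][1]: c += cnt_i[e]' — sum over the set intersection;
      -- cnt_i[e] cannot raise (e ∈ sup_i = cnt_i's keys), ported as getD; the sum is
      -- iteration-order independent, so Python's hash order does not matter.
      let c := (PySem.Set.inter pri.2 (PySem.List.pyGetD prep j (PySem.Dict.empty, [])).2).foldl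
                 (fun c e => c + pri.1.getD e 0) 0
      if c > best then c else best) best) 0

-- ===== PRECONDITION & SPEC =====
def Spec_max_intersection_size (sets : List (List Int)) (out : Int) : Prop := out = max_intersection_size_alt sets
instance (sets : List (List Int)) (out : Int) : Decidable (Spec_max_intersection_size sets out) := by unfold Spec_max_intersection_size; infer_instance

-- ===== CLAIM (what is proved, stated in full; the proofs are below) =====
def Claim_equal_max_intersection_size : Prop := ∀ (sets : List (List Int)), Dom_max_intersection_size sets → Spec_max_intersection_size sets (max_intersection_size sets)

-- ===== LEMMAS AND PROOFS =====

-- both programs' "all index pairs i < j" double loop, as recursion on the list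
def rowsG {α : Type} (f : α → α → Int) : List α → Int → Int
  | [], best => best
  | x :: rest, best =>
    rowsG f rest (rest.foldl (fun best y => if f x y > best then f x y else best) best)

lemma pyRange_one_nil {a b : Int} (h : b ≤ a) : PySem.List.pyRange a b 1 = [] := by
  apply List.eq_nil_iff_forall_not_mem.mpr
  intro j hj
  have := (PySem.List.mem_pyRange_one).mp hj
  omega

lemma innerG {α : Type} (f : α → α → Int) (d : α) (x : α) (v : List α) :
    ∀ (k : Nat) (m : Int),
      (PySem.List.pyRange (k : Int) (v.length : Int) 1).foldl (fun m j =>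
        if f x (PySem.List.pyGetD v j d) > m then f x (PySem.List.pyGetD v j d) else m) m
      = (v.drop k).foldl (fun m y => if f x y > m then f x y else m) m := by
  intro k
  induction hn : v.length - k generalizing k with
  | zero =>
    intro m
    have hk : v.length ≤ k := by omega
    rw [pyRange_one_nil (by exact_mod_cast hk), List.drop_eq_nil_of_le hk]
    rfl
  | succ n ihn =>
    intro m
    have hk : k < v.length := by omega
    rw [PySem.List.pyRange_one_cons (by exact_mod_cast hk)]
    rw [List.drop_eq_getElem_cons hk]
    simp only [List.foldl_cons]
    have hcast : ((k : Int) + 1) = ((k + 1 : Nat) : Int) := by push_cast; ring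
    rw [hcast, ihn (k + 1) (by omega)]
    have hget : PySem.List.pyGetD v (k : Int) d = v[k] := by
      rw [PySem.List.pyGetD_natCast]
      exact List.getD_eq_getElem _ _ hk
    rw [hget]

lemma outerG {α : Type} (f : α → α → Int) (d : α) (v : List α) :
    ∀ (k : Nat) (m : Int),
      (PySem.List.pyRange (k : Int) (v.length : Int) 1).foldl (fun m i =>
        (PySem.List.pyRange (i + 1) (v.length : Int) 1).foldl (fun m j =>
          if f (PySem.List.pyGetD v i d) (PySem.List.pyGetD v j d) > m
          then f (PySem.List.pyGetD v i d) (PySem.List.pyGetD v j d) else m) m) m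
      = rowsG f (v.drop k) m := by
  intro k
  induction hn : v.length - k generalizing k with
  | zero =>
    intro m
    have hk : v.length ≤ k := by omega
    rw [pyRange_one_nil (by exact_mod_cast hk), List.drop_eq_nil_of_le hk]
    rfl
  | succ n ihn =>
    intro m
    have hk : k < v.length := by omega
    rw [PySem.List.pyRange_one_cons (by exact_mod_cast hk)]
    rw [List.drop_eq_getElem_cons hk]
    simp only [List.foldl_cons]
    have hcast : ((k : Int) + 1) = ((k + 1 : Nat) : Int) := by push_cast; ring
    rw [hcast, ihn (k + 1) (by omega)]
    have hget : PySem.List.pyGetD v (k : Int) d = v[k] := by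
      rw [PySem.List.pyGetD_natCast]
      exact List.getD_eq_getElem _ _ hk
    rw [rowsG]
    rw [hget, innerG f d v[k] v (k + 1)]

lemma msz_eq_countP (x y : List Int) :
    manual_intersection_size x y = (x.countP (fun e => decide (e ∈ y)) : Int) := by
  unfold manual_intersection_size
  rw [PySem.List.foldl_if_add_one]
  have h : y.contains = (fun e => decide (e ∈ y)) := funext fun e => by simp
  rw [h]
  simp

-- Σ_{e ∈ l} [e = x] is 1 or 0 for l without duplicates
lemma sum_indicator (x : Int) :
    ∀ (l : List Int), l.Nodup →
      (l.map (fun e => if e = x then (1 : Int) else 0)).sum = if x ∈ l then 1 else 0 := by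
  intro l
  induction l with
  | nil => simp
  | cons a t iht =>
    intro hnd
    rw [List.map_cons, List.sum_cons, iht hnd.of_cons]
    by_cases h : a = x
    · subst h
      have hx : a ∉ t := (List.nodup_cons.mp hnd).1
      simp [hx]
    · simp [h, Ne.symm h]

-- Σ_{e ∈ l} (number of occurrences of e in s), for l without duplicates,
-- counts the elements of s that lie in l
lemma sum_count_nodup (l : List Int) (hl : l.Nodup) :
    ∀ (s : List Int),
      ((l.map (fun e => (s.count e : Int))).sum = ((s.filter (fun e => decide (e ∈ l))).length : Int)) := by
  intro s
  induction s with
  | nil => simp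
  | cons x s' ih =>
    have hcnt : ∀ e : Int, ((x :: s').count e : Int) = (s'.count e : Int) + if e = x then 1 else 0 := by
      intro e
      by_cases h : e = x
      · subst h; simp
      · simp [h, Ne.symm h]
    have hsplit :
        (l.map (fun e => ((x :: s').count e : Int))).sum
          = (l.map (fun e => (s'.count e : Int))).sum + (l.map (fun e => if e = x then (1 : Int) else 0)).sum := by
      rw [← PySem.List.sum_map_add_int]
      congr 1
      apply List.map_congr_left
      intro e _
      exact hcnt e
    rw [hsplit, ih]
    rw [sum_indicator x l hl, List.filter_cons]
    by_cases hx : x ∈ l <;> simp [hx]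

-- the pointwise bridge: B's per-pair sum equals A's per-pair scan
lemma key_lemma (x y : List Int) :
    (PySem.Set.inter (pvPrep x).2 (pvPrep y).2).foldl (fun c e => c + (pvPrep x).1.getD e 0) 0
      = manual_intersection_size x y := by
  unfold pvPrep
  simp only
  have hgetD : ∀ e : Int,
      ((x.foldl (fun d e => d.insert e (d.getD e 0 + 1)) PySem.Dict.empty).getD e 0) = (x.count e : Int) := by
    intro e
    rw [PySem.Dict.getD_foldl_insert_add_one]
    simp
  have hfun : (fun (c : Int) (e : Int) =>
        c + (x.foldl (fun d e => d.insert e (d.getD e 0 + 1)) PySem.Dict.empty).getD e 0)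
      = (fun (c : Int) (e : Int) => c + (x.count e : Int)) :=
    funext fun c => funext fun e => by rw [hgetD e]
  rw [hfun]
  rw [PySem.List.foldl_add]
  set I := PySem.Set.inter (PySem.Set.ofList x) (PySem.Set.ofList y) with hI
  have hnd : I.Nodup := PySem.Set.nodup_inter _ _ (PySem.Set.nodup_ofList x)
  rw [sum_count_nodup I hnd x, msz_eq_countP, List.countP_eq_length_filter]
  have hfc : ∀ e ∈ x, (decide (e ∈ I)) = (decide (e ∈ y)) := by
    intro e he
    have : e ∈ I ↔ e ∈ x ∧ e ∈ y := by
      rw [hI, PySem.Set.mem_inter]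
      simp [PySem.Set.mem_ofList, he]
    simp [this, he]
  rw [List.filter_congr hfc]
  omega

lemma rowsG_map {α β : Type} (f : β → β → Int) (g : α → β) (v : List α) :
    ∀ (m : Int), rowsG f (v.map g) m = rowsG (fun x y => f (g x) (g y)) v m := by
  induction v with
  | nil => intro m; rfl
  | cons x rest ih =>
    intro m
    rw [List.map_cons, rowsG, rowsG, List.foldl_map, ih]

lemma rowsG_congr {α : Type} (f f' : α → α → Int) (h : ∀ x y, f x y = f' x y) (v : List α) :
    ∀ (m : Int), rowsG f v m = rowsG f' v m := by
  have : f = f' := funext fun x => funext fun y => h x y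
  rw [this]
  intro m; rfl

lemma a_eq (sets : List (List Int)) :
    max_intersection_size sets = rowsG (fun x y => manual_intersection_size x y) sets 0 := by
  unfold max_intersection_size
  simp only [PySem.List.len_eq]
  have h := outerG (fun x y => manual_intersection_size x y) ([] : List Int) sets 0 0
  simp only [Nat.cast_zero, List.drop_zero] at h
  exact h

lemma b_eq (sets : List (List Int)) :
    max_intersection_size_alt sets
      = rowsG (fun x y =>
          (PySem.Set.inter x.2 y.2).foldl (fun c e => c + x.1.getD e 0) 0)
          (sets.map pvPrep) 0 := by
  unfold max_intersection_size_alt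
  simp only [PySem.List.foldl_append_singleton_eq_map, List.nil_append, PySem.List.len_eq]
  have h := outerG (fun (x y : PySem.Dict Int Int × PySem.Set Int) =>
      (PySem.Set.inter x.2 y.2).foldl (fun c e => c + x.1.getD e 0) 0)
      ((PySem.Dict.empty, []) : PySem.Dict Int Int × PySem.Set Int) (sets.map pvPrep) 0 0
  simp only [Nat.cast_zero, List.drop_zero] at h
  exact h

-- ===== VERDICT (by name: the statement is the Claim_ definition above) =====
theorem max_intersection_size_spec : Claim_equal_max_intersection_size := by
  intro sets _
  unfold Spec_max_intersection_size
  rw [a_eq, b_eq, rowsG_map]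
  exact rowsG_congr _ _ (fun x y => (key_lemma x y).symm) sets 0
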